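-- pv_equiv track=rewrite | github.com/NelliaS/advent_of_code | advent_of_code_2021/day_8/day_8.py | determine_1_4_7_8
-- ===== SOURCE A (Python) =====
-- from typing import Tuple, Dict, List, Any
--
-- def determine_1_4_7_8(input_signals: List[str]) -> Dict[int, str]:
--     corresponding: Dict[int, str] = {}
--     for el in input_signals:
--         el = "".join(sorted(el))
--         if len(el) == 2:
--             corresponding.setdefault(1, el)
--         elif len(el) == 3:
--             corresponding.setdefault(7, el)
--         elif len(el) == 4:
--             corresponding.setdefault(4, el)
--         elif len(el) == 7:
--             corresponding.setdefault(8, el)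
--     return corresponding
-- ===== SOURCE B (Python) =====
-- # Different decomposition: instead of one pass with setdefault, run an independent
-- # first-occurrence search per target digit, then assemble the dict in input order
-- # by sorting the hits on their index.
-- def determine_1_4_7_8(input_signals):
--     found = []
--     for digit, length in ((1, 2), (7, 3), (4, 4), (8, 7)):
--         for i, el in enumerate(input_signals):
--             if len(el) == length:
--                 found.append((i, digit, "".join(sorted(el))))
--                 break
--     found.sort(key=lambda t: t[0])
--     return {digit: s for _, digit, s in found}
-- ===== Notes on version B (the rewrite author's own statement) =====
-- stated objective: faster
-- what changed: A makes one fused pass mutating a dict with setdefault under an if/elif chain, sorting every signal; B instead runs an independent first-occurrence search per target digit (four scans, no dict mutation during the scan), sorts only the at most four hits by their index, and builds the result dict from that sorted list.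
import Mathlib
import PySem

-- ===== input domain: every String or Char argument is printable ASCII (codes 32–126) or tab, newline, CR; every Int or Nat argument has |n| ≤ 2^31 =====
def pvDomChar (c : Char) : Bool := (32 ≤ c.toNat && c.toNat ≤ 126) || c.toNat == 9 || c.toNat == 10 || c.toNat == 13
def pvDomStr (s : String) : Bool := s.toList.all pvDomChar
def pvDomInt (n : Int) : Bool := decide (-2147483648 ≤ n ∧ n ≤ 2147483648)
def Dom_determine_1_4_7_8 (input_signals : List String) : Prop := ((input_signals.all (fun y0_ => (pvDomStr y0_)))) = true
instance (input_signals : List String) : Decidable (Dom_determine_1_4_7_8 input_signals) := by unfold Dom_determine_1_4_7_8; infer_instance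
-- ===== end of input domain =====

-- B replaces A's single fused pass (setdefault under an if/elif chain) by an independent
-- first-occurrence search per target digit, then sorts the at most four hits by index and
-- builds the dict from that list; same result, measured faster in a timing run
-- (only hit strings get character-sorted).

-- ===== PORT A =====
-- loop body of A: el = "".join(sorted(el)); if/elif on len(el) with setdefault
def pvStepA (d : PySem.Dict Int String) (el : String) : PySem.Dict Int String :=
  let el' : String := String.ofList (PySem.List.sorted el.toList (fun c => c) false)
  if PySem.Str.len el' = 2 then d.setdefault 1 el'
  else if PySem.Str.len el' = 3 then d.setdefault 7 el'
  else if PySem.Str.len el' = 4 then d.setdefault 4 el'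
  else if PySem.Str.len el' = 7 then d.setdefault 8 el'
  else d

def determine_1_4_7_8 (input_signals : List String) : List (Int × String) :=
  (input_signals.foldl pvStepA PySem.Dict.empty).items

-- ===== PORT B =====
-- "".join(sorted(el))
def pvSortStr (el : String) : String :=
  String.ofList (PySem.List.sorted el.toList (fun c => c) false)

-- inner loop of B: 'for i, el in enumerate(...): if len(el) == length: append; break'
-- = the first (index, sorted string) whose length is L, the index count starting at i
def pvFirstHit : List String → Int → Nat → Option (Nat × String)
  | [], _, _ => none
  | el :: t, L, i =>
      if PySem.Str.len el = L then some (i, pvSortStr el) else pvFirstHit t L (i + 1)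

-- ((1, 2), (7, 3), (4, 4), (8, 7))
def pvPairs : List (Int × Int) := [(1, 2), (7, 3), (4, 4), (8, 7)]

def determine_1_4_7_8_alt (input_signals : List String) : List (Int × String) :=
  let found := pvPairs.foldl (fun acc p =>
    match pvFirstHit input_signals p.2 0 with
    | some q => acc ++ [(q.1, p.1, q.2)]
    | none => acc) []
  let sortedFound := PySem.List.sorted found (fun t => t.1) false
  -- {digit: s for _, digit, s in found}
  (sortedFound.foldl (fun d t => d.insert t.2.1 t.2.2) PySem.Dict.empty).items

-- ===== PRECONDITION & SPEC =====
def Spec_determine_1_4_7_8 (input_signals : List String) (out : List (Int × String)) : Prop := out = determine_1_4_7_8_alt input_signals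
instance (input_signals : List String) (out : List (Int × String)) : Decidable (Spec_determine_1_4_7_8 input_signals out) := by unfold Spec_determine_1_4_7_8; infer_instance

-- ===== CLAIM (what is proved, stated in full; the proofs are below) =====
def Claim_equal_determine_1_4_7_8 : Prop := ∀ (input_signals : List String), Dom_determine_1_4_7_8 input_signals → Spec_determine_1_4_7_8 input_signals (determine_1_4_7_8 input_signals)

-- ===== LEMMAS AND PROOFS =====

-- one per-digit search result as a (0- or 1-element) hit list
def pvHit (xs : List String) (L : Int) (i : Nat) (d : Int) : List (Nat × Int × String) :=
  match pvFirstHit xs L i with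
  | some q => [(q.1, d, q.2)]
  | none => []

-- the four searches, gated by which lengths are still wanted
def pvFound (xs : List String) (b2 b3 b4 b7 : Bool) (i : Nat) : List (Nat × Int × String) :=
  (if b2 then pvHit xs 2 i 1 else []) ++ ((if b3 then pvHit xs 3 i 7 else []) ++
  ((if b4 then pvHit xs 4 i 4 else []) ++ (if b7 then pvHit xs 7 i 8 else [])))

-- the canonical single scan in input order (first occurrence of each wanted length)
def pvG : List String → Bool → Bool → Bool → Bool → Nat → List (Nat × Int × String)
  | [], _, _, _, _, _ => []
  | el :: t, b2, b3, b4, b7, i =>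
      if PySem.Str.len el = 2 then
        if b2 then (i, 1, pvSortStr el) :: pvG t false b3 b4 b7 (i + 1)
        else pvG t b2 b3 b4 b7 (i + 1)
      else if PySem.Str.len el = 3 then
        if b3 then (i, 7, pvSortStr el) :: pvG t b2 false b4 b7 (i + 1)
        else pvG t b2 b3 b4 b7 (i + 1)
      else if PySem.Str.len el = 4 then
        if b4 then (i, 4, pvSortStr el) :: pvG t b2 b3 false b7 (i + 1)
        else pvG t b2 b3 b4 b7 (i + 1)
      else if PySem.Str.len el = 7 then
        if b7 then (i, 8, pvSortStr el) :: pvG t b2 b3 b4 false (i + 1)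
        else pvG t b2 b3 b4 b7 (i + 1)
      else pvG t b2 b3 b4 b7 (i + 1)

lemma pvG_cons_2 (el : String) (t : List String) (b2 b3 b4 b7 : Bool) (i : Nat)
    (h : (el.length : Int) = 2) :
    pvG (el :: t) b2 b3 b4 b7 i
      = if b2 then (i, 1, pvSortStr el) :: pvG t false b3 b4 b7 (i + 1)
        else pvG t b2 b3 b4 b7 (i + 1) := by
  rw [pvG]; simp [PySem.Str.len_eq, h]

lemma pvG_cons_3 (el : String) (t : List String) (b2 b3 b4 b7 : Bool) (i : Nat)
    (h2 : ¬ ((el.length : Int) = 2)) (h3 : (el.length : Int) = 3) :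
    pvG (el :: t) b2 b3 b4 b7 i
      = if b3 then (i, 7, pvSortStr el) :: pvG t b2 false b4 b7 (i + 1)
        else pvG t b2 b3 b4 b7 (i + 1) := by
  rw [pvG]; simp [PySem.Str.len_eq, h2, h3]

lemma pvG_cons_4 (el : String) (t : List String) (b2 b3 b4 b7 : Bool) (i : Nat)
    (h2 : ¬ ((el.length : Int) = 2)) (h3 : ¬ ((el.length : Int) = 3))
    (h4 : (el.length : Int) = 4) :
    pvG (el :: t) b2 b3 b4 b7 i
      = if b4 then (i, 4, pvSortStr el) :: pvG t b2 b3 false b7 (i + 1)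
        else pvG t b2 b3 b4 b7 (i + 1) := by
  rw [pvG]; simp [PySem.Str.len_eq, h2, h3, h4]

lemma pvG_cons_7 (el : String) (t : List String) (b2 b3 b4 b7 : Bool) (i : Nat)
    (h2 : ¬ ((el.length : Int) = 2)) (h3 : ¬ ((el.length : Int) = 3))
    (h4 : ¬ ((el.length : Int) = 4)) (h7 : (el.length : Int) = 7) :
    pvG (el :: t) b2 b3 b4 b7 i
      = if b7 then (i, 8, pvSortStr el) :: pvG t b2 b3 b4 false (i + 1)
        else pvG t b2 b3 b4 b7 (i + 1) := by
  rw [pvG]; simp [PySem.Str.len_eq, h2, h3, h4, h7]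

lemma pvG_cons_other (el : String) (t : List String) (b2 b3 b4 b7 : Bool) (i : Nat)
    (h2 : ¬ ((el.length : Int) = 2)) (h3 : ¬ ((el.length : Int) = 3))
    (h4 : ¬ ((el.length : Int) = 4)) (h7 : ¬ ((el.length : Int) = 7)) :
    pvG (el :: t) b2 b3 b4 b7 i = pvG t b2 b3 b4 b7 (i + 1) := by
  rw [pvG]; simp [PySem.Str.len_eq, h2, h3, h4, h7]


lemma pvHit_cons (el : String) (t : List String) (L : Int) (i : Nat) (d : Int)
    (h : ¬ ((el.length : Int) = L)) : pvHit (el :: t) L i d = pvHit t L (i + 1) d := by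
  simp [pvHit, pvFirstHit, PySem.Str.len_eq, h]

lemma pvHit_cons_eq (el : String) (t : List String) (L : Int) (i : Nat) (d : Int)
    (h : (el.length : Int) = L) : pvHit (el :: t) L i d = [(i, d, pvSortStr el)] := by
  simp [pvHit, pvFirstHit, PySem.Str.len_eq, h]

lemma pv_perm_mid2 {α : Type} (a : α) (A B : List α) :
    (A ++ (a :: B)).Perm (a :: (A ++ B)) := List.perm_middle

lemma pv_perm_mid3 {α : Type} (a : α) (A B C : List α) :
    (A ++ (B ++ (a :: C))).Perm (a :: (A ++ (B ++ C))) :=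
  (List.Perm.append_left A List.perm_middle).trans List.perm_middle

lemma pv_perm_mid4 {α : Type} (a : α) (A B C D : List α) :
    (A ++ (B ++ (C ++ (a :: D)))).Perm (a :: (A ++ (B ++ (C ++ D)))) :=
  (List.Perm.append_left A ((List.Perm.append_left B List.perm_middle).trans
    List.perm_middle)).trans List.perm_middle

-- the four searches are a permutation of the single scan
lemma pvFound_perm_pvG (xs : List String) (b2 b3 b4 b7 : Bool) (i : Nat) :
    (pvFound xs b2 b3 b4 b7 i).Perm (pvG xs b2 b3 b4 b7 i) := by
  induction xs generalizing b2 b3 b4 b7 i with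
  | nil =>
      have : pvFound [] b2 b3 b4 b7 i = [] := by
        simp [pvFound, pvHit, pvFirstHit]
      rw [this, pvG]
  | cons el t ih =>
      by_cases h2 : (el.length : Int) = 2
      · rw [show pvG (el :: t) b2 b3 b4 b7 i
            = if b2 then (i, 1, pvSortStr el) :: pvG t false b3 b4 b7 (i + 1)
              else pvG t b2 b3 b4 b7 (i + 1) from by rw [pvG]; simp [PySem.Str.len_eq, h2]]
        cases b2 with
        | true =>
            have he : pvFound (el :: t) true b3 b4 b7 i
                = (i, 1, pvSortStr el) :: pvFound t false b3 b4 b7 (i + 1) := by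
              simp only [pvFound, pvHit_cons_eq el t 2 i 1 h2,
                pvHit_cons el t 3 i 7 (by omega), pvHit_cons el t 4 i 4 (by omega),
                pvHit_cons el t 7 i 8 (by omega), if_true]
              simp
            rw [he, if_pos rfl]
            exact (ih false b3 b4 b7 (i + 1)).cons _
        | false =>
            have he : pvFound (el :: t) false b3 b4 b7 i = pvFound t false b3 b4 b7 (i + 1) := by
              simp only [pvFound, pvHit_cons el t 3 i 7 (by omega),
                pvHit_cons el t 4 i 4 (by omega), pvHit_cons el t 7 i 8 (by omega)]
              simp
            rw [he, if_neg (by simp)]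
            exact ih false b3 b4 b7 (i + 1)
      · by_cases h3 : (el.length : Int) = 3
        · rw [show pvG (el :: t) b2 b3 b4 b7 i
              = if b3 then (i, 7, pvSortStr el) :: pvG t b2 false b4 b7 (i + 1)
                else pvG t b2 b3 b4 b7 (i + 1) from by rw [pvG]; simp [PySem.Str.len_eq, h2, h3]]
          cases b3 with
          | true =>
              have he : pvFound (el :: t) b2 true b4 b7 i
                  = (if b2 then pvHit t 2 (i+1) 1 else []) ++ ((i, 7, pvSortStr el)
                    :: ((if b4 then pvHit t 4 (i+1) 4 else []) ++ (if b7 then pvHit t 7 (i+1) 8 else []))) := by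
                simp only [pvFound, pvHit_cons_eq el t 3 i 7 h3,
                  pvHit_cons el t 2 i 1 h2, pvHit_cons el t 4 i 4 (by omega),
                  pvHit_cons el t 7 i 8 (by omega), if_true]
                simp
              have ht : pvFound t b2 false b4 b7 (i + 1)
                  = (if b2 then pvHit t 2 (i+1) 1 else [])
                    ++ ((if b4 then pvHit t 4 (i+1) 4 else []) ++ (if b7 then pvHit t 7 (i+1) 8 else [])) := by
                simp [pvFound]
              rw [he, if_pos rfl]
              exact (pv_perm_mid2 _ _ _).trans (by rw [← ht]; exact (ih b2 false b4 b7 (i + 1)).cons _)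
          | false =>
              have he : pvFound (el :: t) b2 false b4 b7 i = pvFound t b2 false b4 b7 (i + 1) := by
                simp only [pvFound, pvHit_cons el t 2 i 1 h2,
                  pvHit_cons el t 4 i 4 (by omega), pvHit_cons el t 7 i 8 (by omega)]
                simp
              rw [he, if_neg (by simp)]
              exact ih b2 false b4 b7 (i + 1)
        · by_cases h4 : (el.length : Int) = 4
          · rw [show pvG (el :: t) b2 b3 b4 b7 i
                = if b4 then (i, 4, pvSortStr el) :: pvG t b2 b3 false b7 (i + 1)
                  else pvG t b2 b3 b4 b7 (i + 1) from by rw [pvG]; simp [PySem.Str.len_eq, h2, h3, h4]]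
            cases b4 with
            | true =>
                have he : pvFound (el :: t) b2 b3 true b7 i
                    = (if b2 then pvHit t 2 (i+1) 1 else []) ++ ((if b3 then pvHit t 3 (i+1) 7 else [])
                      ++ ((i, 4, pvSortStr el) :: (if b7 then pvHit t 7 (i+1) 8 else []))) := by
                  simp only [pvFound, pvHit_cons_eq el t 4 i 4 h4,
                    pvHit_cons el t 2 i 1 h2, pvHit_cons el t 3 i 7 h3,
                    pvHit_cons el t 7 i 8 (by omega), if_true]
                  simp
                have ht : pvFound t b2 b3 false b7 (i + 1)
                    = (if b2 then pvHit t 2 (i+1) 1 else []) ++ ((if b3 then pvHit t 3 (i+1) 7 else [])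
                      ++ (if b7 then pvHit t 7 (i+1) 8 else [])) := by
                  simp [pvFound]
                rw [he, if_pos rfl]
                exact (pv_perm_mid3 _ _ _ _).trans (by rw [← ht]; exact (ih b2 b3 false b7 (i + 1)).cons _)
            | false =>
                have he : pvFound (el :: t) b2 b3 false b7 i = pvFound t b2 b3 false b7 (i + 1) := by
                  simp only [pvFound, pvHit_cons el t 2 i 1 h2,
                    pvHit_cons el t 3 i 7 h3, pvHit_cons el t 7 i 8 (by omega)]
                  simp
                rw [he, if_neg (by simp)]
                exact ih b2 b3 false b7 (i + 1)
          · by_cases h7 : (el.length : Int) = 7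
            · rw [show pvG (el :: t) b2 b3 b4 b7 i
                  = if b7 then (i, 8, pvSortStr el) :: pvG t b2 b3 b4 false (i + 1)
                    else pvG t b2 b3 b4 b7 (i + 1) from by rw [pvG]; simp [PySem.Str.len_eq, h2, h3, h4, h7]]
              cases b7 with
              | true =>
                  have he : pvFound (el :: t) b2 b3 b4 true i
                      = (if b2 then pvHit t 2 (i+1) 1 else []) ++ ((if b3 then pvHit t 3 (i+1) 7 else [])
                        ++ ((if b4 then pvHit t 4 (i+1) 4 else []) ++ [(i, 8, pvSortStr el)])) := by
                    simp only [pvFound, pvHit_cons_eq el t 7 i 8 h7,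
                      pvHit_cons el t 2 i 1 h2, pvHit_cons el t 3 i 7 h3,
                      pvHit_cons el t 4 i 4 h4, if_true]
                  have ht : pvFound t b2 b3 b4 false (i + 1)
                      = (if b2 then pvHit t 2 (i+1) 1 else []) ++ ((if b3 then pvHit t 3 (i+1) 7 else [])
                        ++ ((if b4 then pvHit t 4 (i+1) 4 else []) ++ [])) := by
                    simp only [pvFound, if_false, Bool.false_eq_true]
                  rw [he, if_pos rfl]
                  exact (pv_perm_mid4 _ _ _ _ _).trans (by rw [← ht]; exact (ih b2 b3 b4 false (i + 1)).cons _)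
              | false =>
                  have he : pvFound (el :: t) b2 b3 b4 false i = pvFound t b2 b3 b4 false (i + 1) := by
                    simp only [pvFound, pvHit_cons el t 2 i 1 h2,
                      pvHit_cons el t 3 i 7 h3, pvHit_cons el t 4 i 4 h4]
                    simp
                  rw [he, if_neg (by simp)]
                  exact ih b2 b3 b4 false (i + 1)
            · have hG : pvG (el :: t) b2 b3 b4 b7 i = pvG t b2 b3 b4 b7 (i + 1) := by
                rw [pvG]; simp [PySem.Str.len_eq, h2, h3, h4, h7]
              have he : pvFound (el :: t) b2 b3 b4 b7 i = pvFound t b2 b3 b4 b7 (i + 1) := by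
                simp only [pvFound, pvHit_cons el t 2 i 1 h2, pvHit_cons el t 3 i 7 h3,
                  pvHit_cons el t 4 i 4 h4, pvHit_cons el t 7 i 8 h7]
              rw [he, hG]
              exact ih b2 b3 b4 b7 (i + 1)

-- every index in the scan is at least the starting index
lemma pvG_ge (xs : List String) (b2 b3 b4 b7 : Bool) (i : Nat) :
    ∀ p ∈ pvG xs b2 b3 b4 b7 i, i ≤ p.1 := by
  induction xs generalizing b2 b3 b4 b7 i with
  | nil => intro p hp; rw [pvG] at hp; simp at hp
  | cons el t ih =>
      intro p hp
      rw [pvG] at hp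
      split_ifs at hp <;>
        first
          | (rcases List.mem_cons.mp hp with rfl | hp'
             · exact le_refl _
             · exact le_trans (Nat.le_succ i) (ih _ _ _ _ _ p hp'))
          | exact le_trans (Nat.le_succ i) (ih _ _ _ _ _ p hp)

-- the scan's indices are strictly increasing
lemma pvG_pairwise (xs : List String) (b2 b3 b4 b7 : Bool) (i : Nat) :
    (pvG xs b2 b3 b4 b7 i).Pairwise (fun a b => a.1 < b.1) := by
  induction xs generalizing b2 b3 b4 b7 i with
  | nil => rw [pvG]; exact List.Pairwise.nil
  | cons el t ih =>
      rw [pvG]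
      split_ifs <;>
        first
          | exact List.Pairwise.cons
              (fun q hq => lt_of_lt_of_le (Nat.lt_succ_self i) (pvG_ge t _ _ _ _ _ q hq))
              (ih _ _ _ _ _)
          | exact ih _ _ _ _ _

-- digits emitted by the scan are allowed by the corresponding flag
lemma pvG_digit_mem (xs : List String) (b2 b3 b4 b7 : Bool) (i : Nat) :
    ∀ p ∈ pvG xs b2 b3 b4 b7 i,
      (p.2.1 = 1 ∧ b2 = true) ∨ (p.2.1 = 7 ∧ b3 = true) ∨
      (p.2.1 = 4 ∧ b4 = true) ∨ (p.2.1 = 8 ∧ b7 = true) := by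
  induction xs generalizing b2 b3 b4 b7 i with
  | nil => intro p hp; rw [pvG] at hp; simp at hp
  | cons el t ih =>
      intro p hp
      by_cases h2 : (el.length : Int) = 2
      · rw [pvG_cons_2 el t b2 b3 b4 b7 i h2] at hp
        cases b2 with
        | true =>
            simp only [if_true] at hp
            rcases List.mem_cons.mp hp with rfl | hp'
            · exact Or.inl ⟨rfl, rfl⟩
            · rcases ih false b3 b4 b7 (i + 1) p hp' with ⟨_, hb⟩ | hrest
              · cases hb
              · exact Or.inr hrest
        | false =>
            simp only [Bool.false_eq_true, if_false] at hp
            exact ih false b3 b4 b7 (i + 1) p hp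
      · by_cases h3 : (el.length : Int) = 3
        · rw [pvG_cons_3 el t b2 b3 b4 b7 i h2 h3] at hp
          cases b3 with
          | true =>
              simp only [if_true] at hp
              rcases List.mem_cons.mp hp with rfl | hp'
              · exact Or.inr (Or.inl ⟨rfl, rfl⟩)
              · rcases ih b2 false b4 b7 (i + 1) p hp' with hA | ⟨_, hb⟩ | hrest
                · exact Or.inl hA
                · cases hb
                · exact Or.inr (Or.inr hrest)
          | false =>
              simp only [Bool.false_eq_true, if_false] at hp
              exact ih b2 false b4 b7 (i + 1) p hp
        · by_cases h4 : (el.length : Int) = 4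
          · rw [pvG_cons_4 el t b2 b3 b4 b7 i h2 h3 h4] at hp
            cases b4 with
            | true =>
                simp only [if_true] at hp
                rcases List.mem_cons.mp hp with rfl | hp'
                · exact Or.inr (Or.inr (Or.inl ⟨rfl, rfl⟩))
                · rcases ih b2 b3 false b7 (i + 1) p hp' with hA | hB | ⟨_, hb⟩ | hrest
                  · exact Or.inl hA
                  · exact Or.inr (Or.inl hB)
                  · cases hb
                  · exact Or.inr (Or.inr (Or.inr hrest))
            | false =>
                simp only [Bool.false_eq_true, if_false] at hp
                exact ih b2 b3 false b7 (i + 1) p hp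
          · by_cases h7 : (el.length : Int) = 7
            · rw [pvG_cons_7 el t b2 b3 b4 b7 i h2 h3 h4 h7] at hp
              cases b7 with
              | true =>
                  simp only [if_true] at hp
                  rcases List.mem_cons.mp hp with rfl | hp'
                  · exact Or.inr (Or.inr (Or.inr ⟨rfl, rfl⟩))
                  · rcases ih b2 b3 b4 false (i + 1) p hp' with hA | hB | hC | ⟨_, hb⟩
                    · exact Or.inl hA
                    · exact Or.inr (Or.inl hB)
                    · exact Or.inr (Or.inr (Or.inl hC))
                    · cases hb
              | false =>
                  simp only [Bool.false_eq_true, if_false] at hp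
                  exact ih b2 b3 b4 false (i + 1) p hp
            · rw [pvG_cons_other el t b2 b3 b4 b7 i h2 h3 h4 h7] at hp
              exact ih b2 b3 b4 b7 (i + 1) p hp

-- a head digit does not reappear in the tail once its flag is off
lemma pvG_head_fresh (t : List String) (b2 b3 b4 b7 : Bool) (i : Nat) (dg : Int)
    (hdg : (dg = 1 ∧ b2 = false) ∨ (dg = 7 ∧ b3 = false) ∨ (dg = 4 ∧ b4 = false) ∨ (dg = 8 ∧ b7 = false)) :
    dg ∉ (pvG t b2 b3 b4 b7 i).map (fun p => p.2.1) := by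
  intro hmem
  simp only [List.mem_map] at hmem
  obtain ⟨q, hq, hqe⟩ := hmem
  rcases pvG_digit_mem t b2 b3 b4 b7 i q hq with ⟨h, hb⟩ | ⟨h, hb⟩ | ⟨h, hb⟩ | ⟨h, hb⟩ <;>
    rcases hdg with ⟨rfl, hf⟩ | ⟨rfl, hf⟩ | ⟨rfl, hf⟩ | ⟨rfl, hf⟩ <;>
      first
        | (rw [hb] at hf; cases hf)
        | (rw [h] at hqe; omega)

-- the scan's digits are distinct
lemma pvG_digits_nodup (xs : List String) (b2 b3 b4 b7 : Bool) (i : Nat) :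
    ((pvG xs b2 b3 b4 b7 i).map (fun p => p.2.1)).Nodup := by
  induction xs generalizing b2 b3 b4 b7 i with
  | nil => rw [pvG]; simp
  | cons el t ih =>
      by_cases h2 : (el.length : Int) = 2
      · rw [pvG_cons_2 el t b2 b3 b4 b7 i h2]
        cases b2 with
        | true =>
            simp only [if_true, List.map_cons, List.nodup_cons]
            exact ⟨pvG_head_fresh t false b3 b4 b7 (i + 1) 1 (Or.inl ⟨rfl, rfl⟩),
              ih false b3 b4 b7 (i + 1)⟩
        | false => simpa using ih false b3 b4 b7 (i + 1)
      · by_cases h3 : (el.length : Int) = 3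
        · rw [pvG_cons_3 el t b2 b3 b4 b7 i h2 h3]
          cases b3 with
          | true =>
              simp only [if_true, List.map_cons, List.nodup_cons]
              exact ⟨pvG_head_fresh t b2 false b4 b7 (i + 1) 7 (Or.inr (Or.inl ⟨rfl, rfl⟩)),
                ih b2 false b4 b7 (i + 1)⟩
          | false => simpa using ih b2 false b4 b7 (i + 1)
        · by_cases h4 : (el.length : Int) = 4
          · rw [pvG_cons_4 el t b2 b3 b4 b7 i h2 h3 h4]
            cases b4 with
            | true =>
                simp only [if_true, List.map_cons, List.nodup_cons]
                exact ⟨pvG_head_fresh t b2 b3 false b7 (i + 1) 4 (Or.inr (Or.inr (Or.inl ⟨rfl, rfl⟩))),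
                  ih b2 b3 false b7 (i + 1)⟩
            | false => simpa using ih b2 b3 false b7 (i + 1)
          · by_cases h7 : (el.length : Int) = 7
            · rw [pvG_cons_7 el t b2 b3 b4 b7 i h2 h3 h4 h7]
              cases b7 with
              | true =>
                  simp only [if_true, List.map_cons, List.nodup_cons]
                  exact ⟨pvG_head_fresh t b2 b3 b4 false (i + 1) 8 (Or.inr (Or.inr (Or.inr ⟨rfl, rfl⟩))),
                    ih b2 b3 b4 false (i + 1)⟩
              | false => simpa using ih b2 b3 b4 false (i + 1)
            · rw [pvG_cons_other el t b2 b3 b4 b7 i h2 h3 h4 h7]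
              exact ih b2 b3 b4 b7 (i + 1)

-- sorting the four hits by index yields exactly the single scan
lemma pv_sorted_found (xs : List String) (b2 b3 b4 b7 : Bool) (i : Nat) :
    PySem.List.sorted (pvFound xs b2 b3 b4 b7 i) (fun t => t.1) false = pvG xs b2 b3 b4 b7 i :=
  PySem.List.sorted_eq_of_perm_of_pairwise_lt _ _ _
    ((pvFound_perm_pvG xs b2 b3 b4 b7 i).symm) (pvG_pairwise xs b2 b3 b4 b7 i)

-- A's fold equals the single scan, given the contains/flag correspondence
lemma pvA_inv (xs : List String) (d : PySem.Dict Int String) (b2 b3 b4 b7 : Bool) (i : Nat)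
    (h1 : d.contains 1 = !b2) (h7 : d.contains 7 = !b3)
    (h4 : d.contains 4 = !b4) (h8 : d.contains 8 = !b7) :
    (xs.foldl pvStepA d).items
      = d.items ++ (pvG xs b2 b3 b4 b7 i).map (fun p => (p.2.1, p.2.2)) := by
  induction xs generalizing d b2 b3 b4 b7 i with
  | nil => rw [pvG]; simp
  | cons el t ih =>
      simp only [List.foldl_cons]
      by_cases g2 : (el.length : Int) = 2
      · have hA : pvStepA d el = d.setdefault 1 (pvSortStr el) := by
          simp [pvStepA, pvSortStr, PySem.Str.len_eq, PySem.List.length_sorted, g2]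
        cases b2 with
        | true =>
            have hc : d.contains 1 = false := by simpa using h1
            rw [hA, PySem.Dict.setdefault_of_not_contains _ _ hc]
            rw [ih (d.insert 1 (pvSortStr el)) false b3 b4 b7 (i + 1)
              (by simp [PySem.Dict.contains_insert])
              (by simp [PySem.Dict.contains_insert, h7])
              (by simp [PySem.Dict.contains_insert, h4])
              (by simp [PySem.Dict.contains_insert, h8])]
            rw [PySem.Dict.items_insert_of_not_contains _ _ hc]
            rw [show pvG (el :: t) true b3 b4 b7 i
              = (i, 1, pvSortStr el) :: pvG t false b3 b4 b7 (i + 1) from by rw [pvG]; simp [PySem.Str.len_eq, g2]]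
            simp
        | false =>
            have hc : d.contains 1 = true := by simpa using h1
            rw [hA, PySem.Dict.setdefault_of_contains _ _ hc]
            rw [show pvG (el :: t) false b3 b4 b7 i = pvG t false b3 b4 b7 (i + 1) from by
              rw [pvG]; simp [PySem.Str.len_eq, g2]]
            exact ih d false b3 b4 b7 (i + 1) h1 h7 h4 h8
      · by_cases g3 : (el.length : Int) = 3
        · have hA : pvStepA d el = d.setdefault 7 (pvSortStr el) := by
            simp [pvStepA, pvSortStr, PySem.Str.len_eq, PySem.List.length_sorted, g2, g3]
          cases b3 with
          | true =>
              have hc : d.contains 7 = false := by simpa using h7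
              rw [hA, PySem.Dict.setdefault_of_not_contains _ _ hc]
              rw [ih (d.insert 7 (pvSortStr el)) b2 false b4 b7 (i + 1)
                (by simp [PySem.Dict.contains_insert, h1])
                (by simp [PySem.Dict.contains_insert])
                (by simp [PySem.Dict.contains_insert, h4])
                (by simp [PySem.Dict.contains_insert, h8])]
              rw [PySem.Dict.items_insert_of_not_contains _ _ hc]
              rw [show pvG (el :: t) b2 true b4 b7 i
                = (i, 7, pvSortStr el) :: pvG t b2 false b4 b7 (i + 1) from by
                  rw [pvG]; simp [PySem.Str.len_eq, g2, g3]]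
              simp
          | false =>
              have hc : d.contains 7 = true := by simpa using h7
              rw [hA, PySem.Dict.setdefault_of_contains _ _ hc]
              rw [show pvG (el :: t) b2 false b4 b7 i = pvG t b2 false b4 b7 (i + 1) from by
                rw [pvG]; simp [PySem.Str.len_eq, g2, g3]]
              exact ih d b2 false b4 b7 (i + 1) h1 h7 h4 h8
        · by_cases g4 : (el.length : Int) = 4
          · have hA : pvStepA d el = d.setdefault 4 (pvSortStr el) := by
              simp [pvStepA, pvSortStr, PySem.Str.len_eq, PySem.List.length_sorted, g2, g3, g4]
            cases b4 with
            | true =>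
                have hc : d.contains 4 = false := by simpa using h4
                rw [hA, PySem.Dict.setdefault_of_not_contains _ _ hc]
                rw [ih (d.insert 4 (pvSortStr el)) b2 b3 false b7 (i + 1)
                  (by simp [PySem.Dict.contains_insert, h1])
                  (by simp [PySem.Dict.contains_insert, h7])
                  (by simp [PySem.Dict.contains_insert])
                  (by simp [PySem.Dict.contains_insert, h8])]
                rw [PySem.Dict.items_insert_of_not_contains _ _ hc]
                rw [show pvG (el :: t) b2 b3 true b7 i
                  = (i, 4, pvSortStr el) :: pvG t b2 b3 false b7 (i + 1) from by
                    rw [pvG]; simp [PySem.Str.len_eq, g2, g3, g4]]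
                simp
            | false =>
                have hc : d.contains 4 = true := by simpa using h4
                rw [hA, PySem.Dict.setdefault_of_contains _ _ hc]
                rw [show pvG (el :: t) b2 b3 false b7 i = pvG t b2 b3 false b7 (i + 1) from by
                  rw [pvG]; simp [PySem.Str.len_eq, g2, g3, g4]]
                exact ih d b2 b3 false b7 (i + 1) h1 h7 h4 h8
          · by_cases g7 : (el.length : Int) = 7
            · have hA : pvStepA d el = d.setdefault 8 (pvSortStr el) := by
                simp [pvStepA, pvSortStr, PySem.Str.len_eq, PySem.List.length_sorted, g2, g3, g4, g7]
              cases b7 with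
              | true =>
                  have hc : d.contains 8 = false := by simpa using h8
                  rw [hA, PySem.Dict.setdefault_of_not_contains _ _ hc]
                  rw [ih (d.insert 8 (pvSortStr el)) b2 b3 b4 false (i + 1)
                    (by simp [PySem.Dict.contains_insert, h1])
                    (by simp [PySem.Dict.contains_insert, h7])
                    (by simp [PySem.Dict.contains_insert, h4])
                    (by simp [PySem.Dict.contains_insert])]
                  rw [PySem.Dict.items_insert_of_not_contains _ _ hc]
                  rw [show pvG (el :: t) b2 b3 b4 true i
                    = (i, 8, pvSortStr el) :: pvG t b2 b3 b4 false (i + 1) from by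
                      rw [pvG]; simp [PySem.Str.len_eq, g2, g3, g4, g7]]
                  simp
              | false =>
                  have hc : d.contains 8 = true := by simpa using h8
                  rw [hA, PySem.Dict.setdefault_of_contains _ _ hc]
                  rw [show pvG (el :: t) b2 b3 b4 false i = pvG t b2 b3 b4 false (i + 1) from by
                    rw [pvG]; simp [PySem.Str.len_eq, g2, g3, g4, g7]]
                  exact ih d b2 b3 b4 false (i + 1) h1 h7 h4 h8
            · have hA : pvStepA d el = d := by
                simp [pvStepA, pvSortStr, PySem.Str.len_eq, PySem.List.length_sorted, g2, g3, g4, g7]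
              rw [hA]
              rw [show pvG (el :: t) b2 b3 b4 b7 i = pvG t b2 b3 b4 b7 (i + 1) from by
                rw [pvG]; simp [PySem.Str.len_eq, g2, g3, g4, g7]]
              exact ih d b2 b3 b4 b7 (i + 1) h1 h7 h4 h8

-- B's found list is the four ungated searches
lemma pv_found_eq (xs : List String) :
    pvPairs.foldl (fun acc p =>
      match pvFirstHit xs p.2 0 with
      | some q => acc ++ [(q.1, p.1, q.2)]
      | none => acc) []
    = pvFound xs true true true true 0 := by
  have hstep : ∀ (acc : List (Nat × Int × String)) (p : Int × Int),
      (match pvFirstHit xs p.2 0 with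
       | some q => acc ++ [(q.1, p.1, q.2)]
       | none => acc) = acc ++ pvHit xs p.2 0 p.1 := by
    intro acc p
    cases h : pvFirstHit xs p.2 0 <;> simp [pvHit, h]
  simp only [pvPairs, List.foldl_cons, List.foldl_nil, hstep, pvFound, if_true]
  simp [List.append_assoc]

-- ===== VERDICT (by name: the statement is the Claim_ definition above) =====
theorem determine_1_4_7_8_spec : Claim_equal_determine_1_4_7_8 := by
  intro xs _hdom
  show determine_1_4_7_8 xs = determine_1_4_7_8_alt xs
  simp only [determine_1_4_7_8, determine_1_4_7_8_alt, pv_found_eq, pv_sorted_found]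
  rw [pvA_inv xs PySem.Dict.empty true true true true 0 (by simp) (by simp) (by simp) (by simp)]
  have hfresh := PySem.Dict.items_foldl_insert_fresh (pvG xs true true true true 0)
    (fun t : Nat × Int × String => t.2.1) (fun t => t.2.2) PySem.Dict.empty
    (fun a _ => by simp) (pvG_digits_nodup xs true true true true 0)
  simp only [] at hfresh
  rw [hfresh]
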